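-- pv_equiv track=rewrite | github.com/czypdxw7s9-art/substack-tool | substack_exporter.py | pick_count
-- ===== SOURCE A (Python) =====
-- def pick_count(values: list[int]) -> int | None:
--     if not values:
--         return None
--     counts: dict[int, int] = {}
--     for val in values:
--         counts[val] = counts.get(val, 0) + 1
--     best_freq = max(counts.values())
--     best_vals = [val for val, freq in counts.items() if freq == best_freq]
--     return min(best_vals)
-- ===== SOURCE B (Python) =====
-- def pick_count(values: list[int]) -> int | None:
--     if not values:
--         return None
--     s = sorted(values)
--     best_val, best_len = s[0], 1
--     cur_val, cur_len = s[0], 1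
--     for v in s[1:]:
--         if v == cur_val:
--             cur_len += 1
--         else:
--             cur_val, cur_len = v, 1
--         if cur_len > best_len:
--             best_val, best_len = cur_val, cur_len
--     return best_val
-- ===== Notes on version B (the rewrite author's own statement) =====
-- stated objective: alternative
-- what changed: B drops the frequency dictionary entirely: it sorts the list and scans the contiguous runs of equal values once, keeping the first strictly longest run, which in ascending order is exactly the smallest most-frequent value.
import Mathlib
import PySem

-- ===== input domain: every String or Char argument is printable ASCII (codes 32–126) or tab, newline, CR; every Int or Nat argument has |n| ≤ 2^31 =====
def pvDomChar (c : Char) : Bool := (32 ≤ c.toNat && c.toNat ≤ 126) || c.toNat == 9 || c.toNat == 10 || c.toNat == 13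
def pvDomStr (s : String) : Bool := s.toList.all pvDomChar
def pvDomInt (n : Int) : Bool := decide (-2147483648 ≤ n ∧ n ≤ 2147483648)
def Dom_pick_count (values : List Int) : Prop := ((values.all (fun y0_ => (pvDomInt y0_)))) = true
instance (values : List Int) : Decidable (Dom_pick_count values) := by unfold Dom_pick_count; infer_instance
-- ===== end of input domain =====

-- B replaces A's hash-count + max/filter/min selection by sort-then-run-scan:
-- it sorts the values and scans contiguous runs once, keeping the first strictly
-- longest run (= smallest most-frequent value); objective: alternative algorithm.


-- ===== PORT A =====
def pick_count (values : List Int) : Option Int :=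
  if values = [] then
    none
  else
    let counts : PySem.Dict Int Int :=
      values.foldl (fun d val => d.insert val (d.getD val 0 + 1)) PySem.Dict.empty
    match PySem.List.max? counts.values (fun v => v) with
    | none => none  -- unreachable: counts is nonempty when values ≠ []
    | some best_freq =>
        let best_vals := (counts.items.filter (fun p => p.2 == best_freq)).map (fun p => p.1)
        PySem.List.min? best_vals (fun v => v)

-- ===== PORT B =====
-- loop body of Source B's for-loop: state is (best_val, best_len, cur_val, cur_len)
def pcStep (st : Int × Int × Int × Int) (v : Int) : Int × Int × Int × Int :=
  let (bv, bl, cv, cl) := st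
  let (cv', cl') := if v = cv then (cv, cl + 1) else (v, 1)
  if bl < cl' then (cv', cl', cv', cl') else (bv, bl, cv', cl')

def pick_count_alt (values : List Int) : Option Int :=
  if values = [] then
    none
  else
    match PySem.List.sorted values (fun x => x) false with
    | [] => none  -- unreachable: sorted of a nonempty list is nonempty
    | x :: rest => some (rest.foldl pcStep (x, 1, x, 1)).1

-- ===== PRECONDITION & SPEC =====
def Spec_pick_count (values : List Int) (out : Option Int) : Prop := out = pick_count_alt values
instance (values : List Int) (out : Option Int) : Decidable (Spec_pick_count values out) := by unfold Spec_pick_count; infer_instance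

-- ===== CLAIM (what is proved, stated in full; the proofs are below) =====
def Claim_equal_pick_count : Prop := ∀ (values : List Int), Dom_pick_count values → Spec_pick_count values (pick_count values)

-- ===== LEMMAS AND PROOFS =====

-- Invariant of B's run scan over the processed (sorted) prefix p.
def pcInv (p : List Int) (bv bl cv cl : Int) : Prop :=
  (∀ y ∈ p, y ≤ cv) ∧ cv ∈ p ∧ cl = (p.count cv : Int) ∧
  bv ∈ p ∧ bl = (p.count bv : Int) ∧
  (∀ y ∈ p, (p.count y : Int) ≤ bl) ∧
  (∀ y ∈ p, (p.count y : Int) = bl → bv ≤ y)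

theorem pcStep_preserves (p : List Int) (bv bl cv cl v : Int)
    (hinv : pcInv p bv bl cv cl) (hle : ∀ y ∈ p, y ≤ v) :
    pcInv (p ++ [v]) (pcStep (bv, bl, cv, cl) v).1 (pcStep (bv, bl, cv, cl) v).2.1
      (pcStep (bv, bl, cv, cl) v).2.2.1 (pcStep (bv, bl, cv, cl) v).2.2.2 := by
  obtain ⟨hcvub, hcvmem, hcl, hbvmem, hbl, hmax, htie⟩ := hinv
  have hblpos : 1 ≤ bl := by
    have := List.count_pos_iff.mpr hbvmem
    omega
  by_cases hv : v = cv
  · subst hv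
    have hcnt : ((p ++ [v]).count v : Int) = cl + 1 := by
      simp [List.count_append]; omega
    have hcnt' : ∀ y, y ≠ v → ((p ++ [v]).count y : Int) = (p.count y : Int) := by
      intro y hy; simp [List.count_append, Ne.symm hy]
    have hstep : pcStep (bv, bl, v, cl) v =
        if bl < cl + 1 then (v, cl + 1, v, cl + 1) else (bv, bl, v, cl + 1) := by
      simp [pcStep]
    rw [hstep]
    by_cases hcmp : bl < cl + 1
    · rw [if_pos hcmp]
      show pcInv (p ++ [v]) v (cl + 1) v (cl + 1)
      unfold pcInv
      refine ⟨?_, ?_, hcnt.symm, ?_, hcnt.symm, ?_, ?_⟩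
      · intro y hy
        rcases List.mem_append.mp hy with hy | hy
        · exact hcvub y hy
        · rcases List.mem_singleton.mp hy with rfl; exact le_refl _
      · simp
      · simp
      · intro y hy
        by_cases hyv : y = v
        · subst hyv; omega
        · have h1 := hcnt' y hyv
          rcases List.mem_append.mp hy with hy | hy
          · have := hmax y hy; omega
          · exact absurd (List.mem_singleton.mp hy) hyv
      · intro y hy hc
        by_cases hyv : y = v
        · subst hyv; exact le_refl _
        · have h1 := hcnt' y hyv
          rcases List.mem_append.mp hy with hy | hy
          · have := hmax y hy; omega
          · exact absurd (List.mem_singleton.mp hy) hyv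
    · rw [if_neg hcmp]
      show pcInv (p ++ [v]) bv bl v (cl + 1)
      have hbvne : bv ≠ v := by
        intro h; subst h; omega
      unfold pcInv
      refine ⟨?_, ?_, hcnt.symm, ?_, ?_, ?_, ?_⟩
      · intro y hy
        rcases List.mem_append.mp hy with hy | hy
        · exact hcvub y hy
        · rcases List.mem_singleton.mp hy with rfl; exact le_refl _
      · simp
      · exact List.mem_append.mpr (Or.inl hbvmem)
      · rw [hcnt' bv hbvne]; exact hbl
      · intro y hy
        by_cases hyv : y = v
        · subst hyv; omega
        · have h1 := hcnt' y hyv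
          rcases List.mem_append.mp hy with hy | hy
          · have := hmax y hy; omega
          · exact absurd (List.mem_singleton.mp hy) hyv
      · intro y hy hc
        by_cases hyv : y = v
        · subst hyv; exact hcvub bv hbvmem
        · have h1 := hcnt' y hyv
          rcases List.mem_append.mp hy with hy | hy
          · exact htie y hy (by omega)
          · exact absurd (List.mem_singleton.mp hy) hyv
  · -- new run starts: v > cv, so v ∉ p
    have hcv_lt : cv < v := lt_of_le_of_ne (hle cv hcvmem) (fun h => hv h.symm)
    have hvnp : v ∉ p := fun h => absurd (hcvub v h) (by omega)
    have hstep : pcStep (bv, bl, cv, cl) v = (bv, bl, v, 1) := by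
      have h2 : ¬ bl < 1 := by omega
      simp [pcStep, hv, h2]
    rw [hstep]
    show pcInv (p ++ [v]) bv bl v 1
    have hcnt : ((p ++ [v]).count v : Int) = 1 := by
      have h0 : p.count v = 0 := List.count_eq_zero.mpr hvnp
      simp [List.count_append, h0]
    have hcnt' : ∀ y, y ≠ v → ((p ++ [v]).count y : Int) = (p.count y : Int) := by
      intro y hy; simp [List.count_append, Ne.symm hy]
    have hbvne : bv ≠ v := fun h => hvnp (h ▸ hbvmem)
    unfold pcInv
    refine ⟨?_, ?_, hcnt.symm, ?_, ?_, ?_, ?_⟩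
    · intro y hy
      rcases List.mem_append.mp hy with hy | hy
      · exact le_of_lt (lt_of_le_of_lt (hcvub y hy) hcv_lt)
      · rcases List.mem_singleton.mp hy with rfl; exact le_refl _
    · simp
    · exact List.mem_append.mpr (Or.inl hbvmem)
    · rw [hcnt' bv hbvne]; exact hbl
    · intro y hy
      by_cases hyv : y = v
      · subst hyv; omega
      · have h1 := hcnt' y hyv
        rcases List.mem_append.mp hy with hy | hy
        · have := hmax y hy; omega
        · exact absurd (List.mem_singleton.mp hy) hyv
    · intro y hy hc
      by_cases hyv : y = v
      · subst hyv
        exact le_of_lt (lt_of_le_of_lt (hcvub bv hbvmem) hcv_lt)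
      · have h1 := hcnt' y hyv
        rcases List.mem_append.mp hy with hy | hy
        · exact htie y hy (by omega)
        · exact absurd (List.mem_singleton.mp hy) hyv

-- The fold over the sorted remainder keeps the invariant.
theorem pc_fold_inv :
    ∀ (r p : List Int) (bv bl cv cl : Int),
      pcInv p bv bl cv cl →
      (∀ a ∈ p, ∀ b ∈ r, a ≤ b) → r.Pairwise (· ≤ ·) →
      pcInv (p ++ r) (r.foldl pcStep (bv, bl, cv, cl)).1
        (r.foldl pcStep (bv, bl, cv, cl)).2.1
        (r.foldl pcStep (bv, bl, cv, cl)).2.2.1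
        (r.foldl pcStep (bv, bl, cv, cl)).2.2.2 := by
  intro r
  induction r with
  | nil => intro p bv bl cv cl hinv _ _; simpa using hinv
  | cons v r ih =>
      intro p bv bl cv cl hinv hchain hpair
      rw [List.foldl_cons]
      have hle : ∀ y ∈ p, y ≤ v := fun y hy => hchain y hy v (List.mem_cons_self ..)
      have hinv' := pcStep_preserves p bv bl cv cl v hinv hle
      have hchain' : ∀ a ∈ p ++ [v], ∀ b ∈ r, a ≤ b := by
        intro a ha b hb
        rcases List.mem_append.mp ha with ha | ha
        · exact hchain a ha b (List.mem_cons_of_mem _ hb)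
        · rcases List.mem_singleton.mp ha with rfl
          exact (List.pairwise_cons.mp hpair).1 b hb
      have hpair' := (List.pairwise_cons.mp hpair).2
      have := ih (p ++ [v]) _ _ _ _ hinv' hchain' hpair'
      rcases hst : pcStep (bv, bl, cv, cl) v with ⟨bv', bl', cv', cl'⟩
      rw [hst] at this
      simpa [List.append_assoc] using this

-- Characterisation of B: B returns the smallest most-frequent value.
theorem B_char (values : List Int) (hv : values ≠ []) :
    ∃ b, pick_count_alt values = some b ∧ b ∈ values ∧
      (∀ y ∈ values, values.count y ≤ values.count b) ∧
      (∀ y ∈ values, values.count y = values.count b → b ≤ y) := by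
  have hsne : PySem.List.sorted values (fun x => x) false ≠ [] := by
    rw [ne_eq, PySem.List.sorted_eq_nil_iff]; exact hv
  rcases hs : PySem.List.sorted values (fun x => x) false with _ | ⟨x, rest⟩
  · exact absurd hs hsne
  have hperm : (x :: rest).Perm values := hs ▸ PySem.List.sorted_perm values (fun x => x) false
  have hpair : (x :: rest).Pairwise (· ≤ ·) := by
    have := PySem.List.sorted_pairwise values (fun x => x)
    rw [hs] at this; simpa using this
  have hinv0 : pcInv [x] x 1 x 1 := by
    refine ⟨?_, ?_, ?_, ?_, ?_, ?_, ?_⟩ <;> simp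
  have hchain : ∀ a ∈ [x], ∀ b ∈ rest, a ≤ b := by
    intro a ha b hb
    rcases List.mem_singleton.mp ha with rfl
    exact (List.pairwise_cons.mp hpair).1 b hb
  have hinv := pc_fold_inv rest [x] x 1 x 1 hinv0 hchain (List.pairwise_cons.mp hpair).2
  obtain ⟨_, _, _, hbmem, hbl, hmax, htie⟩ := hinv
  simp only [List.singleton_append] at hbmem hbl hmax htie
  refine ⟨(rest.foldl pcStep (x, 1, x, 1)).1, ?_, ?_, ?_, ?_⟩
  · unfold pick_count_alt
    rw [if_neg hv, hs]
  · exact hperm.mem_iff.mp hbmem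
  · intro y hy
    have hy' : y ∈ x :: rest := hperm.mem_iff.mpr hy
    have h1 := hmax y hy'
    have e1 := hperm.count_eq y
    have e2 := hperm.count_eq (rest.foldl pcStep (x, 1, x, 1)).1
    omega
  · intro y hy hc
    have hy' : y ∈ x :: rest := hperm.mem_iff.mpr hy
    have e1 := hperm.count_eq y
    have e2 := hperm.count_eq (rest.foldl pcStep (x, 1, x, 1)).1
    exact htie y hy' (by omega)

-- Characterisation of A: A returns the smallest most-frequent value.
theorem A_char (values : List Int) (hv : values ≠ []) :
    ∃ a, pick_count values = some a ∧ a ∈ values ∧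
      (∀ y ∈ values, values.count y ≤ values.count a) ∧
      (∀ y ∈ values, values.count y = values.count a → a ≤ y) := by
  unfold pick_count
  rw [if_neg hv]
  simp only [PySem.Dict.foldl_insert_getD_add_one_eq_counter, PySem.Dict.values,
    PySem.Dict.items_counter, List.map_map, Function.comp_def]
  set S := PySem.Set.ofList values with hS
  have hSne : S ≠ [] := by
    obtain ⟨v, hv'⟩ : ∃ v, v ∈ values := by
      cases values with
      | nil => exact absurd rfl hv
      | cons v vs => exact ⟨v, List.mem_cons_self ..⟩
    exact List.ne_nil_of_mem ((PySem.Set.mem_ofList _ _).mpr hv')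
  have hmne : S.map (fun k => ((values.count k : Nat) : Int)) ≠ [] := by
    simpa [List.map_eq_nil_iff] using hSne
  have hmax : PySem.List.max? (S.map (fun k => ((values.count k : Nat) : Int)))
      (fun v => v) ≠ none :=
    fun h => hmne ((PySem.List.max?_eq_none_iff _ _).mp h)
  obtain ⟨M, hM⟩ := Option.ne_none_iff_exists'.mp hmax
  rw [hM]
  -- some key attains M
  obtain ⟨k0, hk0S, hk0M⟩ := List.mem_map.mp (PySem.List.max?_mem hM)
  have hk0f : (k0, ((values.count k0 : Nat) : Int)) ∈
      (S.map (fun k => (k, ((values.count k : Nat) : Int)))).filter (fun p => p.2 == M) :=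
    List.mem_filter.mpr ⟨List.mem_map_of_mem hk0S, by simp [hk0M]⟩
  have hfne : ((S.map (fun k => (k, ((values.count k : Nat) : Int)))).filter
      (fun p => p.2 == M)).map (fun p => p.1) ≠ [] := by
    simp only [ne_eq, List.map_eq_nil_iff]
    exact List.ne_nil_of_mem hk0f
  have hmin : PySem.List.min? (((S.map (fun k => (k, ((values.count k : Nat) : Int)))).filter
      (fun p => p.2 == M)).map (fun p => p.1)) (fun v => v) ≠ none :=
    fun h => hfne ((PySem.List.min?_eq_none_iff _ _).mp h)
  obtain ⟨a, ha⟩ := Option.ne_none_iff_exists'.mp hmin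
  -- a is a max-count key
  obtain ⟨pa, hpa, rfl⟩ := List.mem_map.mp (PySem.List.min?_mem ha)
  obtain ⟨hpal, hpaM⟩ := List.mem_filter.mp hpa
  obtain ⟨a0, ha0S, rfl⟩ := List.mem_map.mp hpal
  have hpaM' : ((values.count a0 : Nat) : Int) = M := by simpa using hpaM
  refine ⟨a0, ha, (PySem.Set.mem_ofList _ _).mp ha0S, ?_, ?_⟩
  · intro y hy
    have hyS : y ∈ S := (PySem.Set.mem_ofList _ _).mpr hy
    have := PySem.List.max?_isMax hM ((values.count y : Nat) : Int)
      (List.mem_map_of_mem hyS)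
    simp only at this
    omega
  · intro y hy hc
    have hyS : y ∈ S := (PySem.Set.mem_ofList _ _).mpr hy
    have hyf : (y, ((values.count y : Nat) : Int)) ∈
        (S.map (fun k => (k, ((values.count k : Nat) : Int)))).filter (fun p => p.2 == M) :=
      List.mem_filter.mpr ⟨List.mem_map_of_mem hyS, by simp [hc, hpaM']⟩
    exact PySem.List.min?_isMin ha y (List.mem_map_of_mem hyf)

-- ===== VERDICT (by name: the statement is the Claim_ definition above) =====
theorem pick_count_spec : Claim_equal_pick_count := by
  intro values _
  unfold Spec_pick_count
  by_cases hv : values = []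
  · subst hv; rfl
  · obtain ⟨a, hA, haMem, haMax, haTie⟩ := A_char values hv
    obtain ⟨b, hB, hbMem, hbMax, hbTie⟩ := B_char values hv
    have hcnt : values.count a = values.count b :=
      le_antisymm (hbMax a haMem) (haMax b hbMem)
    have hab : a = b :=
      le_antisymm (haTie b hbMem hcnt.symm) (hbTie a haMem hcnt)
    rw [hA, hB, hab]
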